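-- pv_equiv track=rewrite | github.com/SYeon-424/GBlocks | gblock.py | expand_to_pattern
-- ===== SOURCE A (Python) =====
-- def expand_to_pattern(base_ref: str, aln_seq: str, target_gaps):
--     L=len(base_ref)
--     aln_base=[]; j_base=0
--     for ch in aln_seq:
--         if ch=='-': aln_base.append('-')
--         else: aln_base.append(base_ref[j_base]); j_base+=1
--     out=[]; i_aln=0
--     for k in range(L):
--         out.extend('-'*target_gaps[k])
--         while i_aln<len(aln_seq):
--             ch_a=aln_seq[i_aln]; ch_b=aln_base[i_aln]; i_aln+=1
--             out.append(ch_a)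
--             if ch_b!='-': break
--     out.extend('-'*target_gaps[L])
--     return "".join(out)
-- ===== SOURCE B (Python) =====
-- def expand_to_pattern(base_ref: str, aln_seq: str, target_gaps):
--     L = len(base_ref)
--     # Pass 1: per-column segment index = number of real-base columns strictly before it.
--     ref = iter(base_ref)
--     seg = []
--     count = 0
--     for ch in aln_seq:
--         seg.append(count)
--         if ch != '-' and next(ref) != '-':
--             count += 1
--     # Pass 2: scatter each column's character into its segment's bucket (indices >= L are dropped).
--     buckets = [[] for _ in range(L)]
--     for ch, k in zip(aln_seq, seg):
--         if k < L:
--             buckets[k].append(ch)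
--     # Pass 3: interleave the gap runs with the buckets.
--     gaps = ['-' * g for g in target_gaps[:L + 1]]
--     return ''.join(g + ''.join(b) for g, b in zip(gaps, buckets + [[]]))
-- ===== Notes on version B (the rewrite author's own statement) =====
-- stated objective: alternative
-- what changed: B replaces A's streamed two-pointer emission (aln_base table plus interleaved for/while consumption) by three staged passes: compute a per-column segment index from a running real-base count, scatter each column's character into a per-segment bucket array, then interleave the gap runs with the buckets.
import Mathlib
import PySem

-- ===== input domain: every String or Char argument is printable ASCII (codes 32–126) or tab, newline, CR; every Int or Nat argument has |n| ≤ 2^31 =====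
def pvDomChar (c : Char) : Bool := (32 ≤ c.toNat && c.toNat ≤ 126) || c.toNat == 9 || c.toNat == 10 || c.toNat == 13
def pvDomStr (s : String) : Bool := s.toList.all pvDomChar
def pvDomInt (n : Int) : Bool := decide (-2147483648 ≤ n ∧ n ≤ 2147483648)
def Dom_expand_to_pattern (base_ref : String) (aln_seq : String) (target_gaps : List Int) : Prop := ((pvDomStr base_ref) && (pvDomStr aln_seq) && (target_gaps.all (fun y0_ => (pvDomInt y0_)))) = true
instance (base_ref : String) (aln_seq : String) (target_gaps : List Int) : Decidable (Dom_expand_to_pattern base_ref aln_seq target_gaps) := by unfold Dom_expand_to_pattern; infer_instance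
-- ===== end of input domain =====

-- B replaces A's streamed two-pointer emission by three staged passes: compute a segment
-- index per column, scatter characters into per-segment buckets, interleave with the gap
-- runs (objective: alternative decomposition, sequential stream → index-and-scatter).

-- ===== PORT A =====
-- '-' * g  (Python: negative g gives the empty string; Int.toNat clamps likewise)
def pvGapRep (g : Int) : List Char := List.replicate g.toNat '-'

-- body of A's first loop: append '-' or base_ref[j_base] (default '-' is unreachable under Pre_)
def pvStepA (base : List Char) (s : List Char × Nat) (ch : Char) : List Char × Nat :=
  if ch = '-' then (s.1 ++ ['-'], s.2)
  else (s.1 ++ [(PySem.List.pyGet? base (s.2 : Int)).getD '-'], s.2 + 1)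

-- A's inner while loop over the remaining (aln_seq[i], aln_base[i]) pairs:
-- emit chars until (and including) the first pair whose base char is not '-'
def pvConsumeA : List (Char × Char) → List Char × List (Char × Char)
  | [] => ([], [])
  | (a, b) :: t =>
      if b ≠ '-' then ([a], t)
      else ((a :: (pvConsumeA t).1), (pvConsumeA t).2)

-- A's outer 'for k in range(L)' loop, n iterations remaining, current index idx
def pvLoopA (gaps : List Int) : Nat → Nat → List (Char × Char) → List Char
  | 0, _, _ => []
  | n + 1, idx, rem =>
      pvGapRep ((PySem.List.pyGet? gaps (idx : Int)).getD 0)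
        ++ (pvConsumeA rem).1 ++ pvLoopA gaps n (idx + 1) (pvConsumeA rem).2

def expand_to_pattern (base_ref : String) (aln_seq : String) (target_gaps : List Int) : String :=
  let L := base_ref.toList.length
  let aln_base := (aln_seq.toList.foldl (pvStepA base_ref.toList) ([], 0)).1
  let pairs := aln_seq.toList.zip aln_base
  String.ofList (pvLoopA target_gaps L 0 pairs
    ++ pvGapRep ((PySem.List.pyGet? target_gaps (L : Int)).getD 0))

-- ===== PORT B =====
-- B's pass 1 body: record the current count, then advance the base_ref iterator (modelled
-- as the remaining suffix; headD '-' on the exhausted iterator is unreachable under Pre_)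
def pvSegStep (s : List Nat × Nat × List Char) (ch : Char) : List Nat × Nat × List Char :=
  let s1 := s.1 ++ [s.2.1]
  if ch ≠ '-' then
    if s.2.2.headD '-' ≠ '-' then (s1, s.2.1 + 1, s.2.2.tail) else (s1, s.2.1, s.2.2.tail)
  else (s1, s.2.1, s.2.2)

-- B's pass 2 body: append the character to bucket k (dropped when k ≥ number of buckets)
def pvScatter (buckets : List (List Char)) (p : Char × Nat) : List (List Char) :=
  if p.2 < buckets.length then buckets.set p.2 (buckets.getD p.2 [] ++ [p.1]) else buckets

def expand_to_pattern_alt (base_ref : String) (aln_seq : String) (target_gaps : List Int) : String :=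
  let L := base_ref.toList.length
  let seg := (aln_seq.toList.foldl pvSegStep ([], 0, base_ref.toList)).1
  let buckets := (aln_seq.toList.zip seg).foldl pvScatter (List.replicate L [])
  let gapsS := (target_gaps.take (L + 1)).map pvGapRep
  String.ofList ((gapsS.zip (buckets ++ [[]])).foldl (fun acc p => acc ++ p.1 ++ p.2) [])

-- ===== PRECONDITION & SPEC =====
-- Pre_ is exactly where Python A returns: base_ref[j_base] must never go out of range
-- (no more non-gap chars in aln_seq than len(base_ref)) and target_gaps[k] is read for
-- k = 0..len(base_ref) (IndexError otherwise).
def Pre_expand_to_pattern (base_ref : String) (aln_seq : String) (target_gaps : List Int) : Prop :=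
  aln_seq.toList.countP (fun ch => ch ≠ '-') ≤ base_ref.toList.length ∧
  base_ref.toList.length + 1 ≤ target_gaps.length
instance (base_ref : String) (aln_seq : String) (target_gaps : List Int) : Decidable (Pre_expand_to_pattern base_ref aln_seq target_gaps) := by unfold Pre_expand_to_pattern; infer_instance

def pvWitness_expand_to_pattern : String × String × List Int := ("AC-G", "A-CG", [1, 0, 2, 0, 1])

def Spec_expand_to_pattern (base_ref : String) (aln_seq : String) (target_gaps : List Int) (out : String) : Prop := out = expand_to_pattern_alt base_ref aln_seq target_gaps
instance (base_ref : String) (aln_seq : String) (target_gaps : List Int) (out : String) : Decidable (Spec_expand_to_pattern base_ref aln_seq target_gaps out) := by unfold Spec_expand_to_pattern; infer_instance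

-- ===== CLAIM (what is proved, stated in full; the proofs are below) =====
def Claim_equal_expand_to_pattern : Prop := ∀ (base_ref : String) (aln_seq : String) (target_gaps : List Int), Dom_expand_to_pattern base_ref aln_seq target_gaps → Pre_expand_to_pattern base_ref aln_seq target_gaps → Spec_expand_to_pattern base_ref aln_seq target_gaps (expand_to_pattern base_ref aln_seq target_gaps)

-- ===== LEMMAS AND PROOFS =====

-- the (aln char, base char) pair stream both programs walk, j = non-gap chars consumed so far
def pvPairSeq (base : List Char) : List Char → Nat → List (Char × Char)
  | [], _ => []
  | ch :: t, j =>
      if ch = '-' then (ch, '-') :: pvPairSeq base t j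
      else (ch, (PySem.List.pyGet? base (j : Int)).getD '-') :: pvPairSeq base t (j + 1)

-- the chunk decomposition: each chunk ends at a real-base pair, plus the trailing remainder
def pvChunks : List (Char × Char) → List (List Char)
  | [] => [[]]
  | (a, b) :: t =>
      if b ≠ '-' then [a] :: pvChunks t
      else match pvChunks t with
        | [] => [[a]]              -- unreachable: pvChunks is never []
        | h :: r => (a :: h) :: r

def pvConsHead (cur : List Char) : List (List Char) → List (List Char)
  | [] => [cur]
  | h :: r => (cur ++ h) :: r

-- the pair stream annotated with its running real-base count (B's segment indices)
def pvIdxSeq : List (Char × Char) → Nat → List (Char × Nat)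
  | [], _ => []
  | (a, b) :: t, c => (a, c) :: pvIdxSeq t (if b ≠ '-' then c + 1 else c)

-- reference form of B's scatter pass: append chunk contents at positions c, c+1, …
def pvMerge : List (List Char) → Nat → List (List Char) → List (List Char)
  | b, _, [] => b
  | b, c, h :: r => pvMerge (if c < b.length then b.set c (b.getD c [] ++ h) else b) (c + 1) r

-- reference form of B's assembly pass
def pvInter : List Int → List (List Char) → List Char
  | g :: gs, b :: bs => pvGapRep g ++ b ++ pvInter gs bs
  | _, _ => []

-- reference form of A's outer loop over the chunk list
def pvLoopC (gaps : List Int) (chunks : List (List Char)) : Nat → Nat → List Char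
  | 0, _ => []
  | n + 1, idx =>
      pvGapRep ((PySem.List.pyGet? gaps (idx : Int)).getD 0)
        ++ chunks.getD idx [] ++ pvLoopC gaps chunks n (idx + 1)

theorem pvChunks_cons (a b : Char) (t : List (Char × Char)) :
    pvChunks ((a, b) :: t) = if b ≠ '-' then [a] :: pvChunks t
      else pvConsHead [a] (pvChunks t) := by
  rw [pvChunks]
  split
  · rfl
  · cases hc : pvChunks t <;> simp [pvConsHead]

theorem pvChunks_ne_nil (l : List (Char × Char)) : pvChunks l ≠ [] := by
  match l with
  | [] => simp [pvChunks]
  | (a, b) :: t =>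
      simp only [pvChunks]
      split
      · simp
      · cases h : pvChunks t <;> simp

theorem pvConsume_fst (l : List (Char × Char)) :
    (pvConsumeA l).1 = (pvChunks l).headD [] := by
  induction l with
  | nil => simp [pvConsumeA, pvChunks]
  | cons p t ih =>
      obtain ⟨a, b⟩ := p
      simp only [pvConsumeA, pvChunks]
      split
      · simp
      · cases h : pvChunks t with
        | nil => exact absurd h (pvChunks_ne_nil t)
        | cons c r => simp [ih, h]

theorem pvConsume_snd_nil (l : List (Char × Char)) (h : (pvChunks l).tail = []) :
    (pvConsumeA l).2 = [] := by
  induction l with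
  | nil => simp [pvConsumeA]
  | cons p t ih =>
      obtain ⟨a, b⟩ := p
      simp only [pvConsumeA, pvChunks] at *
      split at h
      · rename_i hb
        simp only [List.tail_cons] at h
        exact absurd h (pvChunks_ne_nil t)
      · rename_i hb
        simp only [if_neg hb]
        cases hc : pvChunks t with
        | nil => exact absurd hc (pvChunks_ne_nil t)
        | cons c r =>
            rw [hc] at h
            simp only [List.tail_cons] at h
            exact ih (by rw [hc]; simpa using h)

theorem pvConsume_snd_chunks (l : List (Char × Char)) (h : (pvChunks l).tail ≠ []) :
    pvChunks (pvConsumeA l).2 = (pvChunks l).tail := by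
  induction l with
  | nil => simp [pvChunks] at h
  | cons p t ih =>
      obtain ⟨a, b⟩ := p
      simp only [pvConsumeA, pvChunks] at *
      split at h
      · rename_i hb
        simp [if_pos hb]
      · rename_i hb
        simp only [if_neg hb]
        cases hc : pvChunks t with
        | nil => exact absurd hc (pvChunks_ne_nil t)
        | cons c r =>
            rw [hc] at h
            simp only [List.tail_cons] at h ⊢
            rw [ih (by rw [hc]; simpa using h), hc]
            rfl

-- once the pair stream is exhausted, A emits only gap padding; so does the chunk loop
theorem pvLoop_empty (gaps : List Int) (chunks : List (List Char)) :
    ∀ n idx, chunks.drop idx = [] → pvLoopA gaps n idx [] = pvLoopC gaps chunks n idx := by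
  intro n
  induction n with
  | zero => intro idx _; rfl
  | succ m ih =>
      intro idx h
      have hlen : chunks.length ≤ idx := List.drop_eq_nil_iff.mp h
      simp only [pvLoopA, pvLoopC, pvConsumeA]
      rw [List.getD_eq_default _ _ hlen, ih (idx + 1) (List.drop_eq_nil_iff.mpr (by omega))]

theorem pvGetD_eq_headD_drop (chunks : List (List Char)) (idx : Nat) :
    chunks.getD idx [] = (chunks.drop idx).headD [] := by
  induction chunks generalizing idx with
  | nil => simp
  | cons h t ih => cases idx with
    | zero => simp
    | succ n => simp

-- A-side loop correspondence: interleaved consumption = indexed chunk lookup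
theorem pvLoop_eq (gaps : List Int) (chunks : List (List Char)) :
    ∀ n idx l, chunks.drop idx = pvChunks l →
      pvLoopA gaps n idx l = pvLoopC gaps chunks n idx := by
  intro n
  induction n with
  | zero => intro idx l _; rfl
  | succ m ih =>
      intro idx l h
      simp only [pvLoopA, pvLoopC]
      have hget : chunks.getD idx [] = (pvConsumeA l).1 := by
        rw [pvGetD_eq_headD_drop, h, pvConsume_fst]
      rw [hget]
      have hdrop : chunks.drop (idx + 1) = (pvChunks l).tail := by
        rw [← List.tail_drop, h]
      by_cases ht : (pvChunks l).tail = []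
      · rw [pvConsume_snd_nil l ht,
          pvLoop_empty gaps chunks m (idx + 1) (by rw [hdrop, ht])]
      · rw [ih (idx + 1) (pvConsumeA l).2 (by rw [hdrop, pvConsume_snd_chunks l ht])]

-- A's aln_base construction yields exactly the snd column of the pair stream
theorem pvStepA_spec (base : List Char) :
    ∀ (rest : List Char) (acc : List Char) (j : Nat),
      (rest.foldl (pvStepA base) (acc, j)).1 = acc ++ (pvPairSeq base rest j).map Prod.snd := by
  intro rest
  induction rest with
  | nil => intro acc j; simp [pvPairSeq]
  | cons ch t ih =>
      intro acc j
      simp only [List.foldl_cons, pvStepA, pvPairSeq]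
      by_cases hch : ch = '-'
      · simp [hch, ih]
      · simp [hch, ih]

theorem pvZip_pairSeq (base : List Char) :
    ∀ (rest : List Char) (j : Nat),
      rest.zip ((pvPairSeq base rest j).map Prod.snd) = pvPairSeq base rest j := by
  intro rest
  induction rest with
  | nil => intro j; simp [pvPairSeq]
  | cons ch t ih =>
      intro j
      by_cases hch : ch = '-' <;> simp [pvPairSeq, hch, ih]

-- B's pass 1 computes the running real-base counts of the pair stream
theorem pvSegStep_spec (base : List Char) :
    ∀ (rest : List Char) (acc : List Nat) (c j : Nat),
      (rest.foldl pvSegStep (acc, c, base.drop j)).1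
        = acc ++ (pvIdxSeq (pvPairSeq base rest j) c).map Prod.snd := by
  intro rest
  induction rest with
  | nil => intro acc c j; simp [pvPairSeq, pvIdxSeq]
  | cons ch t ih =>
      intro acc c j
      have hhead : (base.drop j).headD '-' = (PySem.List.pyGet? base (j : Int)).getD '-' := by
        simp [List.headD_eq_head?_getD, List.head?_drop]
      simp only [List.foldl_cons, pvSegStep, pvPairSeq]
      by_cases hch : ch = '-'
      · simp [hch, pvIdxSeq, ih]
      · simp only [hch, if_pos (by simpa using hch : ch ≠ '-'), hhead, List.tail_drop]
        by_cases hb : base[j]?.getD '-' = '-'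
        · simp [hb, pvIdxSeq, ih]
        · simp [hb, pvIdxSeq, ih]

-- zipping the columns back onto their counts recovers the annotated stream
theorem pvZip_idxSeq (base : List Char) :
    ∀ (rest : List Char) (c j : Nat),
      rest.zip ((pvIdxSeq (pvPairSeq base rest j) c).map Prod.snd)
        = pvIdxSeq (pvPairSeq base rest j) c := by
  intro rest
  induction rest with
  | nil => intro c j; simp [pvPairSeq, pvIdxSeq]
  | cons ch t ih =>
      intro c j
      by_cases hch : ch = '-' <;> simp [pvPairSeq, hch, pvIdxSeq, ih]

theorem pvGetD_set_self (b : List (List Char)) (c : Nat) (x : List Char) (h : c < b.length) :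
    (b.set c x).getD c [] = x := by
  simp [List.getD_eq_getElem?_getD, List.getElem?_set_self', List.getElem?_eq_getElem h]

-- B's pass 2 realises the chunk decomposition as bucket contents
theorem pvScatter_spec :
    ∀ (l : List (Char × Char)) (b : List (List Char)) (c : Nat),
      (pvIdxSeq l c).foldl pvScatter b = pvMerge b c (pvChunks l) := by
  intro l
  induction l with
  | nil =>
      intro b c
      simp only [pvIdxSeq, List.foldl_nil, pvChunks, pvMerge]
      by_cases h : c < b.length
      · simp [h]
      · simp [h]
  | cons p t ih =>
      obtain ⟨a, bb⟩ := p
      intro b c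
      simp only [pvIdxSeq, List.foldl_cons, pvScatter, pvChunks_cons]
      by_cases hbb : bb ≠ '-'
      · simp only [if_pos hbb]
        rw [ih]
        rfl
      · have hbb' : bb = '-' := by simpa using hbb
        subst hbb'
        simp only [if_neg (by simp : ¬('-' : Char) ≠ '-')]
        cases hc : pvChunks t with
        | nil => exact absurd hc (pvChunks_ne_nil t)
        | cons h r =>
            simp only [pvConsHead]
            rw [ih, hc]
            by_cases hlt : c < b.length
            · rw [if_pos hlt]
              simp only [pvMerge, List.length_set, if_pos hlt]
              rw [pvGetD_set_self b c _ hlt, List.set_set]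
              have : b.getD c [] ++ [a] ++ h = b.getD c [] ++ ([a] ++ h) := by
                simp [List.append_assoc]
              rw [this]
            · rw [if_neg hlt]
              simp only [pvMerge, if_neg hlt]

theorem pvMerge_length (chunks : List (List Char)) :
    ∀ (b : List (List Char)) (c : Nat), (pvMerge b c chunks).length = b.length := by
  induction chunks with
  | nil => intro b c; rfl
  | cons h r ih =>
      intro b c
      simp only [pvMerge]
      rw [ih]
      split <;> simp

theorem pvMerge_getD_lt (chunks : List (List Char)) :
    ∀ (b : List (List Char)) (c k : Nat), k < c →
      (pvMerge b c chunks).getD k [] = b.getD k [] := by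
  induction chunks with
  | nil => intro b c k _; rfl
  | cons h r ih =>
      intro b c k hk
      simp only [pvMerge]
      rw [ih _ _ _ (by omega)]
      split
      · simp [List.getD_eq_getElem?_getD, List.getElem?_set_ne (by omega : c ≠ k)]
      · rfl

theorem pvMerge_getD (chunks : List (List Char)) :
    ∀ (b : List (List Char)) (c k : Nat), c ≤ k → k < b.length → b.getD k [] = [] →
      (pvMerge b c chunks).getD k [] = chunks.getD (k - c) [] := by
  induction chunks with
  | nil => intro b c k _ _ hnil; simpa [pvMerge] using hnil
  | cons h r ih =>
      intro b c k hck hkb hnil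
      simp only [pvMerge]
      by_cases heq : k = c
      · subst heq
        rw [pvMerge_getD_lt r _ _ _ (by omega), if_pos hkb, pvGetD_set_self _ _ _ hkb, hnil]
        simp
      · have hck' : c + 1 ≤ k := by omega
        rw [ih _ (c + 1) k hck' (by split <;> simpa) (by
          split
          · rw [List.getD_eq_getElem?_getD, List.getElem?_set_ne (by omega : c ≠ k),
              ← List.getD_eq_getElem?_getD, hnil]
          · exact hnil)]
        have : k - c = (k - (c + 1)) + 1 := by omega
        rw [this]
        rfl

-- B's pass 3 fold equals the recursive interleaving
theorem pvFold_inter (gs : List Int) :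
    ∀ (bs : List (List Char)) (acc : List Char),
      ((gs.map pvGapRep).zip bs).foldl (fun a p => a ++ p.1 ++ p.2) acc
        = acc ++ pvInter gs bs := by
  induction gs with
  | nil => intro bs acc; simp [pvInter]
  | cons g gs' ih =>
      intro bs acc
      cases bs with
      | nil => simp [pvInter]
      | cons b bs' =>
          simp only [List.map_cons, List.zip_cons_cons, List.foldl_cons, pvInter]
          rw [ih]
          simp [List.append_assoc]

-- the interleaving of gap runs with the buckets equals A's chunk loop plus its final gap run
theorem pvInter_loop (gaps : List Int) (chunks : List (List Char)) :
    ∀ (n idx : Nat) (buckets : List (List Char)),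
      idx + n < gaps.length → buckets.length = idx + n →
      (∀ k, k < buckets.length → buckets.getD k [] = chunks.getD k []) →
      pvInter ((gaps.drop idx).take (n + 1)) (buckets.drop idx ++ [[]])
        = pvLoopC gaps chunks n idx
          ++ pvGapRep ((PySem.List.pyGet? gaps ((idx + n : Nat) : Int)).getD 0) := by
  intro n
  induction n with
  | zero =>
      intro idx buckets hlen hbl _
      have hidx : idx < gaps.length := by omega
      have hb : buckets.drop idx = [] := List.drop_eq_nil_iff.mpr (by omega)
      rw [List.drop_eq_getElem_cons hidx, hb]
      rw [show List.take 1 (gaps[idx] :: List.drop (idx + 1) gaps) = [gaps[idx]] from rfl]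
      simp only [List.nil_append, pvInter, pvLoopC, Nat.add_zero]
      simp [PySem.List.pyGet?_natCast, List.getElem?_eq_getElem hidx]
  | succ m ih =>
      intro idx buckets hlen hbl hgd
      have hidx : idx < gaps.length := by omega
      have hbidx : idx < buckets.length := by omega
      rw [List.drop_eq_getElem_cons hidx, List.drop_eq_getElem_cons hbidx]
      simp only [List.take_succ_cons, List.cons_append, pvInter, pvLoopC]
      rw [ih (idx + 1) buckets (by omega) (by omega) hgd]
      have hbg : buckets[idx] = chunks.getD idx [] := by
        rw [← hgd idx hbidx]
        simp [List.getD_eq_getElem?_getD, List.getElem?_eq_getElem hbidx]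
      rw [hbg]
      have : ((idx + 1) + m : Nat) = (idx + (m + 1) : Nat) := by omega
      rw [this]
      simp [PySem.List.pyGet?_natCast, List.getElem?_eq_getElem hidx, List.append_assoc]

-- ===== VERDICT (by name: the statement is the Claim_ definition above) =====
theorem expand_to_pattern_spec : Claim_equal_expand_to_pattern := by
  intro base_ref aln_seq target_gaps _ hpre
  obtain ⟨-, hglen⟩ := hpre
  set base := base_ref.toList with hbase
  set aln := aln_seq.toList with haln
  set L := base.length with hL
  set pairs := pvPairSeq base aln 0 with hpairsdef
  set chunks := pvChunks pairs with hchunksdef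
  -- A side
  have hpairs : aln.zip ((aln.foldl (pvStepA base) ([], 0)).1) = pairs := by
    rw [pvStepA_spec base aln [] 0]
    simpa using pvZip_pairSeq base aln 0
  -- B side, pass 1
  have hseg : (aln.foldl pvSegStep ([], 0, base)).1
      = (pvIdxSeq pairs 0).map Prod.snd := by
    have := pvSegStep_spec base aln [] 0 0
    simpa using this
  have hzipseg : aln.zip ((aln.foldl pvSegStep ([], 0, base)).1) = pvIdxSeq pairs 0 := by
    rw [hseg]
    exact pvZip_idxSeq base aln 0 0
  -- B side, pass 2
  have hbuckets : (aln.zip ((aln.foldl pvSegStep ([], 0, base)).1)).foldl pvScatter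
      (List.replicate L []) = pvMerge (List.replicate L []) 0 chunks := by
    rw [hzipseg, pvScatter_spec]
  set buckets := pvMerge (List.replicate L []) 0 chunks with hbk
  have hblen : buckets.length = L := by rw [hbk, pvMerge_length]; simp
  have hbget : ∀ k, k < buckets.length → buckets.getD k [] = chunks.getD k [] := by
    intro k hk
    rw [hblen] at hk
    rw [hbk, pvMerge_getD chunks (List.replicate L []) 0 k (by omega) (by simpa)
      (by simp [List.getD_eq_getElem?_getD, hk])]
    simp
  -- assemble
  simp only [Spec_expand_to_pattern, expand_to_pattern, expand_to_pattern_alt,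
    ← hbase, ← haln, ← hL]
  rw [hpairs, hbuckets, pvFold_inter, List.nil_append,
    pvLoop_eq target_gaps chunks L 0 pairs (by simpa using hchunksdef.symm)]
  have := pvInter_loop target_gaps chunks L 0 buckets (by omega) (by omega) hbget
  simp only [List.drop_zero, Nat.zero_add] at this
  rw [this]
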